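-- pv_equiv track=rewrite | github.com/nnatchy/Python-2021-1 | grader homework/09/09_NestedList_★★★_Fill_In_Numbers.py | pattern5
-- ===== SOURCE A (Python) =====
-- def rowtocol(l):
--     real = []
--     tempreal = []
--     for i in range(len(l)):
--         for j in range(len(l[i])):
--             tempreal.append(l[j][i])
--         real.append(tempreal)
--         tempreal = []
--     return real
--
-- def pattern5(N):
--     k = 1
--     final = []
--     templist = [0]*N
--     for i in range(0, N):
--         gap = N-1
--         for j in range(N-i-1, N):
--             templist[j] = k
--             k = k + gap
--             gap = gap - 1
--         final.append((templist[::-1]))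
--         templist = [0]*N
--         k = i+1
--         k += 1
--     return rowtocol(final)
-- ===== SOURCE B (Python) =====
-- def pattern5(N):
--     return [[0 if r < c else (r + 1) + (r - c) * (N - 1) - (r - c) * (r - c - 1) // 2
--              for r in range(N)]
--             for c in range(N)]
-- ===== Notes on version B (the rewrite author's own statement) =====
-- stated objective: simpler
-- what changed: Replaces the incremental k/gap row-filling loops, the per-row reversal and the separate rowtocol transpose with a single closed-form double comprehension that computes each output cell directly from its row and column indices.
import Mathlib
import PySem

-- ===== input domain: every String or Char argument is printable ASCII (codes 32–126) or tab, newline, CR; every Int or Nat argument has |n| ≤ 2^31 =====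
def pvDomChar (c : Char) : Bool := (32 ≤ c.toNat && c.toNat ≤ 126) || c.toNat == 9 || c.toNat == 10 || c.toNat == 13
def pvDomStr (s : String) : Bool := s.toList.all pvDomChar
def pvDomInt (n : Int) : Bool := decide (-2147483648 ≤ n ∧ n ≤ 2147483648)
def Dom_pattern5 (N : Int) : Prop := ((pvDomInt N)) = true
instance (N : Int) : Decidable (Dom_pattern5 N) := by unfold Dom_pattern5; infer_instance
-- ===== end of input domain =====

-- B replaces A's incremental k/gap fill, per-row reversal and rowtocol transpose with one
-- closed-form double comprehension computing each cell directly (objective: simpler).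


-- ===== PORT A =====
-- helper 'rowtocol' of A; the pyGetD defaults are never reached: pattern5 only calls it on a
-- square matrix, so every l[j][i] access is in range (exact there).
def rowtocol (l : List (List Int)) : List (List Int) :=
  List.foldl
    (fun real i =>
      real ++ [List.foldl
        (fun tempreal j =>
          tempreal ++ [PySem.List.pyGetD (PySem.List.pyGetD l j []) i 0])
        [] (PySem.List.pyRange 0 ((PySem.List.pyGetD l i []).length : Int) 1)])
    [] (PySem.List.pyRange 0 (l.length : Int) 1)

-- body of A's inner 'for j' loop; state = (templist, k, gap)
def p5InnerStep (st : List Int × Int × Int) (j : Int) : List Int × Int × Int :=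
  (PySem.List.pySetD st.1 j st.2.1, st.2.1 + st.2.2, st.2.2 - 1)

-- body of A's outer 'for i' loop; state = (final, k, templist); gap = N-1 is reset each pass,
-- then templist := [0]*N and k := i+1; k += 1
def p5OuterStep (N : Int) (st : List (List Int) × Int × List Int) (i : Int) :
    List (List Int) × Int × List Int :=
  (st.1 ++ [(PySem.List.slice?
      (List.foldl p5InnerStep (st.2.2, st.2.1, N - 1) (PySem.List.pyRange (N - i - 1) N 1)).1
      none none (-1)).getD []],
   i + 1 + 1,
   PySem.List.pyRepeat [0] N)

def pattern5 (N : Int) : List (List Int) :=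
  rowtocol
    (List.foldl (p5OuterStep N) ([], 1, PySem.List.pyRepeat [0] N)
      (PySem.List.pyRange 0 N 1)).1

-- ===== PORT B =====
def pattern5_alt (N : Int) : List (List Int) :=
  (PySem.List.pyRange 0 N 1).map (fun c =>
    (PySem.List.pyRange 0 N 1).map (fun r =>
      if r < c then 0
      else (r + 1) + (r - c) * (N - 1) - PySem.Int.floordiv ((r - c) * (r - c - 1)) 2))

-- ===== PRECONDITION & SPEC =====
def Spec_pattern5 (N : Int) (out : List (List Int)) : Prop := out = pattern5_alt N
instance (N : Int) (out : List (List Int)) : Decidable (Spec_pattern5 N out) := by unfold Spec_pattern5; infer_instance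

-- ===== CLAIM (what is proved, stated in full; the proofs are below) =====
def Claim_equal_pattern5 : Prop := ∀ (N : Int), Dom_pattern5 N → Spec_pattern5 N (pattern5 N)

-- ===== LEMMAS AND PROOFS =====

-- triangular numbers: tri t = 0 + 1 + … + (t-1)
def tri : Nat → Int
  | 0 => 0
  | t + 1 => tri t + t

lemma tri_mul_two (t : Nat) : 2 * tri t = (t : Int) * ((t : Int) - 1) := by
  induction t with
  | zero => simp [tri]
  | succ t ih =>
    simp only [tri]
    push_cast
    linear_combination ih

lemma floordiv_eq_tri (t : Nat) :
    PySem.Int.floordiv ((t : Int) * ((t : Int) - 1)) 2 = tri t := by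
  rw [← tri_mul_two, PySem.Int.floordiv_eq_ediv_of_pos (by norm_num : (0:Int) < 2)]
  omega

-- A's inner loop: filling templist[j] = k; k += gap; gap -= 1 over j ∈ [a, a+m)
lemma inner_fold (m : Nat) : ∀ (a : Nat) (k gap : Int) (lst : List Int),
    List.foldl p5InnerStep (lst, k, gap)
        (PySem.List.pyRange (a : Int) ((a : Int) + (m : Int)) 1) =
      ((List.range lst.length).map (fun p =>
          if a ≤ p ∧ p < a + m then k + ((p : Int) - a) * gap - tri (p - a) else lst.getD p 0),
       k + m * gap - tri m, gap - m) := by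
  induction m with
  | zero =>
    intro a k gap lst
    rw [PySem.List.pyRange_one_eq_nil (by omega)]
    simp only [List.foldl_nil, tri]
    refine Prod.ext ?_ (by simp)
    simp only
    apply List.ext_getElem
    · simp
    · intro p h1 h2
      simp only [List.length_map, List.length_range] at h2
      simp only [List.getElem_map, List.getElem_range]
      rw [if_neg (by omega)]
      simp [List.getD, List.getElem?_eq_getElem h1]
  | succ m ih =>
    intro a k gap lst
    rw [PySem.List.pyRange_one_cons (by push_cast; omega)]
    simp only [List.foldl_cons]
    have hstep : p5InnerStep (lst, k, gap) (a : Int) =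
        (lst.set a k, k + gap, gap - 1) := by
      simp [p5InnerStep, PySem.List.pySetD_natCast]
    rw [hstep]
    have hstart : (a : Int) + 1 = ((a + 1 : Nat) : Int) := by push_cast; ring
    have hbound : (a : Int) + ((m : Nat) + 1 : Nat) = ((a + 1 : Nat) : Int) + (m : Int) := by
      push_cast; ring
    rw [hbound, hstart, ih (a + 1) (k + gap) (gap - 1) (lst.set a k)]
    refine Prod.ext ?_ (Prod.ext ?_ ?_)
    · simp only [List.length_set]
      apply List.map_congr_left
      intro p hp
      simp only [List.mem_range] at hp
      by_cases h1 : a + 1 ≤ p ∧ p < a + 1 + m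
      · rw [if_pos h1, if_pos (by omega)]
        obtain ⟨h1a, h1b⟩ := h1
        have ht : p - a = (p - (a + 1)) + 1 := by omega
        rw [ht]
        simp only [tri]
        have hc1 : ((p : Int) - (a + 1 : Nat)) = (p : Int) - a - 1 := by push_cast; ring
        have hc2 : ((p - (a + 1) : Nat) : Int) = (p : Int) - a - 1 := by
          push_cast [Nat.cast_sub (by omega : a + 1 ≤ p)]; ring
        rw [hc1, hc2]
        ring
      · by_cases h2 : p = a
        · subst h2
          rw [if_neg h1, if_pos (by omega)]
          have : (lst.set p k).getD p 0 = k := by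
            rw [List.getD_eq_getElem _ _ (by simpa using hp)]
            simp
          rw [this]
          simp [tri]
        · rw [if_neg h1, if_neg (by omega)]
          rw [List.getD, List.getD, List.getElem?_set_ne (by omega)]
    · simp only [tri]; push_cast; ring
    · simp only; push_cast; ring

-- reversing a map over List.range
lemma reverse_map_range {f : Nat → Int} (n : Nat) :
    ((List.range n).map f).reverse = (List.range n).map (fun c => f (n - 1 - c)) := by
  apply List.ext_getElem
  · simp
  · intro i h1 h2
    simp only [List.length_reverse, List.length_map, List.length_range] at h1
    rw [List.getElem_reverse]
    simp only [List.getElem_map, List.getElem_range, List.length_map, List.length_range]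

-- the row A appends for outer index i (already reversed), for N = n ≥ 1, 0 ≤ i < n
def rowA (n : Nat) (i : Nat) : List Int :=
  (List.range n).map (fun c =>
    if c ≤ i then ((i : Int) + 1) + ((i : Int) - c) * ((n : Int) - 1) - tri (i - c) else 0)

lemma outer_pass (n : Nat) (i : Nat) (hi : i < n) (st : List (List Int) × Int × List Int)
    (hk : st.2.1 = (i : Int) + 1) (ht : st.2.2 = PySem.List.pyRepeat [0] (n : Int)) :
    p5OuterStep (n : Int) st (i : Int) =
      (st.1 ++ [rowA n i], (i : Int) + 1 + 1, PySem.List.pyRepeat [0] (n : Int)) := by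
  have hrep : PySem.List.pyRepeat [0] (n : Int) = List.replicate n (0 : Int) := by
    rw [PySem.List.pyRepeat_singleton]; simp
  have key : (PySem.List.slice?
      (List.foldl p5InnerStep (PySem.List.pyRepeat [0] (n : Int), (i : Int) + 1, (n : Int) - 1)
        (PySem.List.pyRange ((n : Int) - i - 1) (n : Int) 1)).1
      none none (-1)).getD [] = rowA n i := by
    have hrange : PySem.List.pyRange ((n : Int) - i - 1) (n : Int) 1 =
        PySem.List.pyRange ((n - 1 - i : Nat) : Int) (((n - 1 - i : Nat) : Int) + ((i + 1 : Nat) : Int)) 1 := by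
      congr 1
      · omega
      · omega
    rw [hrep, hrange, inner_fold (i + 1) (n - 1 - i) ((i : Int) + 1) ((n : Int) - 1) _]
    simp only [List.length_replicate]
    rw [PySem.List.slice?_none_none_neg_one]
    simp only [Option.getD_some]
    rw [reverse_map_range]
    unfold rowA
    apply List.map_congr_left
    intro c hc
    simp only [List.mem_range] at hc
    by_cases h : c ≤ i
    · rw [if_pos (by omega), if_pos h]
      have h1 : ((n - 1 - c : Nat) : Int) = (n : Int) - 1 - c := by omega
      have h2 : ((n - 1 - i : Nat) : Int) = (n : Int) - 1 - i := by omega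
      have h3 : n - 1 - c - (n - 1 - i) = i - c := by omega
      rw [h1, h2, h3]
      ring_nf
    · rw [if_neg (by omega), if_neg h]
      rw [List.getD_eq_getElem _ _ (by simp; omega)]
      simp
  unfold p5OuterStep
  rw [ht, hk, key]

-- the outer fold, by induction on the remaining iterations
lemma outer_fold (n : Nat) : ∀ (j : Nat) (i0 : Nat) (acc : List (List Int)),
    i0 + j = n →
    (List.foldl (p5OuterStep (n : Int)) (acc, (i0 : Int) + 1, PySem.List.pyRepeat [0] (n : Int))
        (PySem.List.pyRange (i0 : Int) (n : Int) 1)).1 =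
      acc ++ (List.range' i0 j).map (rowA n) := by
  intro j
  induction j with
  | zero =>
    intro i0 acc h
    rw [PySem.List.pyRange_one_eq_nil (by omega)]
    simp
  | succ j ih =>
    intro i0 acc h
    rw [PySem.List.pyRange_one_cons (by omega)]
    simp only [List.foldl_cons]
    rw [outer_pass n i0 (by omega) _ rfl rfl]
    have hc : ((i0 : Int) + 1) = ((i0 + 1 : Nat) : Int) := by push_cast; ring
    rw [hc, ih (i0 + 1) _ (by omega)]
    rw [List.range'_succ]
    simp

-- entry of rowA
lemma rowA_getD (n j i : Nat) (_hj : j < n) (hi : i < n) :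
    (rowA n j).getD i 0 =
      if i ≤ j then ((j : Int) + 1) + ((j : Int) - i) * ((n : Int) - 1) - tri (j - i) else 0 := by
  unfold rowA
  rw [List.getD_eq_getElem _ _ (by simpa using hi)]
  simp

-- rowtocol of the matrix of A's rows is the closed-form matrix
lemma rowtocol_rows (n : Nat) :
    rowtocol ((List.range n).map (rowA n)) =
      (List.range n).map (fun (i : Nat) => (List.range n).map (fun (j : Nat) =>
        if i ≤ j then ((j : Int) + 1) + ((j : Int) - i) * ((n : Int) - 1) - tri (j - i) else 0)) := by
  unfold rowtocol
  rw [PySem.List.foldl_append_singleton_eq_map]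
  simp only [List.nil_append, List.length_map, List.length_range]
  rw [PySem.List.pyRange_zero_natCast, List.map_map]
  apply List.map_congr_left
  intro i hi
  simp only [List.mem_range] at hi
  simp only [Function.comp_apply]
  have hMi : PySem.List.pyGetD ((List.range n).map (rowA n)) (i : Int) [] = rowA n i := by
    rw [PySem.List.pyGetD_natCast, List.getD_eq_getElem _ _ (by simpa using hi)]
    simp
  rw [hMi]
  have hlen : ((rowA n i).length : Int) = (n : Int) := by
    unfold rowA; simp
  rw [hlen, PySem.List.foldl_append_singleton_eq_map, List.nil_append,
    PySem.List.pyRange_zero_natCast, List.map_map]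
  apply List.map_congr_left
  intro j hj
  simp only [List.mem_range] at hj
  simp only [Function.comp_apply]
  have hMj : PySem.List.pyGetD ((List.range n).map (rowA n)) (j : Int) [] = rowA n j := by
    rw [PySem.List.pyGetD_natCast, List.getD_eq_getElem _ _ (by simpa using hj)]
    simp
  rw [hMj, PySem.List.pyGetD_natCast]
  exact rowA_getD n j i hj hi

theorem pattern5_eq (N : Int) : pattern5 N = pattern5_alt N := by
  by_cases hN : N ≤ 0
  · have hr : PySem.List.pyRange 0 N 1 = [] := PySem.List.pyRange_one_eq_nil (by omega)
    unfold pattern5 pattern5_alt rowtocol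
    rw [hr]
    simp [PySem.List.pyRange_one_eq_nil]
  · replace hN : 0 < N := not_le.mp hN
    obtain ⟨n, rfl⟩ : ∃ n : Nat, N = (n : Int) := ⟨N.toNat, by omega⟩
    unfold pattern5
    have h00 : ((0 : Nat) : Int) = (0 : Int) := by norm_num
    have hf := outer_fold n n 0 [] (by omega)
    rw [h00] at hf
    rw [show (List.foldl (p5OuterStep (n : Int)) ([], 1, PySem.List.pyRepeat [0] (n : Int))
        (PySem.List.pyRange 0 (n : Int) 1)).1 = [] ++ (List.range' 0 n).map (rowA n) from by
      rw [← hf]; norm_num]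
    rw [List.nil_append, ← List.range_eq_range', rowtocol_rows n]
    unfold pattern5_alt
    rw [PySem.List.pyRange_zero_natCast, List.map_map]
    apply List.map_congr_left
    intro i hi
    simp only [List.mem_range] at hi
    simp only [Function.comp_apply]
    rw [List.map_map]
    apply List.map_congr_left
    intro j hj
    simp only [List.mem_range] at hj
    simp only [Function.comp_apply]
    by_cases h : i ≤ j
    · rw [if_pos h, if_neg (by omega)]
      have h4 : ((j - i : Nat) : Int) = (j : Int) - i := by
        push_cast [Nat.cast_sub h]; ring
      rw [show ((j : Int) - i) * ((j : Int) - i - 1) =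
          ((j - i : Nat) : Int) * (((j - i : Nat) : Int) - 1) from by rw [h4],
        floordiv_eq_tri (j - i)]
    · rw [if_neg h, if_pos (by omega)]

-- ===== VERDICT (by name: the statement is the Claim_ definition above) =====
theorem pattern5_spec : Claim_equal_pattern5 := by
  intro N _
  unfold Spec_pattern5
  exact pattern5_eq N
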